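-- pv_equiv track=rewrite | github.com/K-Roman/les_11 | 02_prime_numbers.py | prime_numbers_generator
-- ===== SOURCE A (Python) =====
-- def prime_numbers_generator(n,n1):
--     for number in range(2, n + 1):
--         for prime in range(2, number):
--             if number % prime == 0:
--                 break
--         else:
--             if n1 == 1 and happy_dig(number):
--                 yield number
--             elif n1 == 2 and palindrome(number):
--                 yield number
--
-- def happy_dig(dig):
--     str_dig = str(dig)
--     first_half = 0
--     second_half = 0
--     half_len = int(len(str_dig)/2)
--     for i in range(0, half_len):
--         first_half += int(str_dig[i])
--         second_half += int(str_dig[::-1][i])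
--     return first_half == second_half
--
-- def palindrome(dig):
--     str_dig = str(dig)
--     return str_dig == str_dig[::-1]
-- ===== SOURCE B (Python) =====
-- def _happy(q):
--     d = [int(c) for c in str(q)]
--     h = len(d) // 2
--     return sum(d[:h]) == sum(d[len(d) - h:])
--
--
-- def _pal(q):
--     s = str(q)
--     return s == s[::-1]
--
--
-- def prime_numbers_generator(n, n1):
--     # Sieve of Eratosthenes instead of per-number trial division.
--     sieve = [True] * (n + 1)
--     for p in range(2, n + 1):
--         for m in range(2 * p, n + 1, p):
--             sieve[m] = False
--     out = []
--     for q in range(2, n + 1):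
--         if sieve[q]:
--             if n1 == 1 and _happy(q):
--                 out.append(q)
--             elif n1 == 2 and _pal(q):
--                 out.append(q)
--     return out
-- ===== Notes on version B (the rewrite author's own statement) =====
-- stated objective: faster
-- what changed: Replaces A's per-number trial division over every smaller number with one Sieve-of-Eratosthenes-style composite-marking pass over a boolean table, with the digit filters rewritten as slice sums.
import Mathlib
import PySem

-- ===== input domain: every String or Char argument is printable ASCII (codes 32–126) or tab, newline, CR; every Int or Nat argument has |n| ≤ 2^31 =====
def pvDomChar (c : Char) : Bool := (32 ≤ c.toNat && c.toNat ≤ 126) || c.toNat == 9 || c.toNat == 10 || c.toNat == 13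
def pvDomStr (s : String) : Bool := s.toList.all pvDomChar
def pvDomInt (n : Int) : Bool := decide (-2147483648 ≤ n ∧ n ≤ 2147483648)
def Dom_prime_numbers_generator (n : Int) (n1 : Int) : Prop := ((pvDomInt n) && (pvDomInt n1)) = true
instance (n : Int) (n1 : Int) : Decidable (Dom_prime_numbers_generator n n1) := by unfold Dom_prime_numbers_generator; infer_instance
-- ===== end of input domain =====

-- B replaces A's per-number trial division (over every smaller number) by one Sieve-of-Eratosthenes-style
-- composite-marking pass, with the digit filters rewritten over slices; objective: faster (asymptotic).

-- ===== PORT A =====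
-- int(c) for a single character c of str(number); exact here since every number tested is ≥ 2,
-- so str(number) consists of digit characters only.
def pvDigitA (c : Char) : Int := (c.toNat : Int) - 48

-- happy_dig: half_len = int(len/2) is exact floor division for a nonnegative length.
def pvHappyDig (dig : Int) : Bool :=
  let strDig := PySem.Int.toChars dig
  let halfLen := strDig.length / 2
  let r := (List.range halfLen).foldl
    (fun (acc : Int × Int) i =>
      (acc.1 + pvDigitA (strDig.getD i ' '), acc.2 + pvDigitA (strDig.reverse.getD i ' ')))
    (0, 0)
  r.1 == r.2

def pvPalindrome (dig : Int) : Bool :=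
  let strDig := PySem.Int.toChars dig
  strDig == strDig.reverse

-- the generator, collected into the list of yielded values; the inner for/break/else becomes the
-- 'any divisor found' test (break only skips the else-clause).
def prime_numbers_generator (n : Int) (n1 : Int) : List Int :=
  (PySem.List.pyRange 2 (n + 1) 1).foldl (fun acc number =>
    if (PySem.List.pyRange 2 number 1).any (fun prime => PySem.Int.mod number prime == 0) then
      acc
    else if n1 == 1 && pvHappyDig number then acc ++ [number]
    else if n1 == 2 && pvPalindrome number then acc ++ [number]
    else acc) []

-- ===== PORT B =====
def pvDigitB (c : Char) : Int := (c.toNat : Int) - 48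

-- slices d[:h] and d[len(d)-h:] with 0 ≤ h ≤ len(d) are exactly take/drop.
def pvHappyAlt (q : Int) : Bool :=
  let d := (PySem.Int.toChars q).map pvDigitB
  let h := d.length / 2
  (d.take h).sum == (d.drop (d.length - h)).sum

def pvPalAlt (q : Int) : Bool :=
  let s := PySem.Int.toChars q
  s == s.reverse

-- [True] * (n+1) is the empty list for n+1 ≤ 0, which is exactly Int.toNat's clamping.
def pvSieve (n : Int) : List Bool :=
  (PySem.List.pyRange 2 (n + 1) 1).foldl (fun sv p =>
    (PySem.List.pyRange (2 * p) (n + 1) p).foldl (fun a m => a.set m.toNat false) sv)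
    (List.replicate (n + 1).toNat true)

-- sieve[q] is an in-range nonnegative index read (2 ≤ q ≤ n < len), ported as getD.
def prime_numbers_generator_alt (n : Int) (n1 : Int) : List Int :=
  let sieve := pvSieve n
  (PySem.List.pyRange 2 (n + 1) 1).foldl (fun out q =>
    if sieve.getD q.toNat false then
      if n1 == 1 && pvHappyAlt q then out ++ [q]
      else if n1 == 2 && pvPalAlt q then out ++ [q]
      else out
    else out) []

-- ===== PRECONDITION & SPEC =====
def Spec_prime_numbers_generator (n : Int) (n1 : Int) (out : List Int) : Prop := out = prime_numbers_generator_alt n n1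
instance (n : Int) (n1 : Int) (out : List Int) : Decidable (Spec_prime_numbers_generator n n1 out) := by unfold Spec_prime_numbers_generator; infer_instance

-- ===== CLAIM (what is proved, stated in full; the proofs are below) =====
def Claim_equal_prime_numbers_generator : Prop := ∀ (n : Int) (n1 : Int), Dom_prime_numbers_generator n n1 → Spec_prime_numbers_generator n n1 (prime_numbers_generator n n1)

-- ===== LEMMAS AND PROOFS =====

-- a fold of in-place markings read back at j: false iff some mark hit j
theorem pv_foldl_set_getD (L : List Int) (sv : List Bool) (j : Nat) (hj : j < sv.length) :
    (L.foldl (fun a m => a.set m.toNat false) sv).getD j false =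
      if L.any (fun m => m.toNat == j) then false else sv.getD j false := by
  induction L generalizing sv with
  | nil => simp
  | cons m L ih =>
    simp only [List.foldl_cons, List.any_cons]
    rw [ih _ (by simpa using hj)]
    by_cases hmj : m.toNat = j
    · subst hmj
      simp [List.getD_eq_getElem?_getD, List.getElem?_set_self hj]
    · simp [hmj, List.getD_eq_getElem?_getD, List.getElem?_set_ne hmj]

theorem pv_foldl_set_length (L : List Int) (sv : List Bool) :
    (L.foldl (fun a m => a.set m.toNat false) sv).length = sv.length := by
  induction L generalizing sv with
  | nil => rfl
  | cons m L ih => simp [List.foldl_cons, ih]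

-- the nested sieve folds read back at j
theorem pv_outer_fold_getD (n : Int) (P : List Int) (sv : List Bool) (j : Nat) (hj : j < sv.length) :
    (P.foldl (fun sv p =>
        (PySem.List.pyRange (2 * p) (n + 1) p).foldl (fun a m => a.set m.toNat false) sv) sv).getD j false =
      if P.any (fun p => (PySem.List.pyRange (2 * p) (n + 1) p).any (fun m => m.toNat == j)) then false
      else sv.getD j false := by
  induction P generalizing sv with
  | nil => simp
  | cons p P ih =>
    simp only [List.foldl_cons, List.any_cons]
    rw [ih _ (by rw [pv_foldl_set_length]; exact hj)]
    by_cases hp : (PySem.List.pyRange (2 * p) (n + 1) p).any (fun m => m.toNat == j) = true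
    · rw [pv_foldl_set_getD _ _ _ hj]
      simp [hp]
    · rw [pv_foldl_set_getD _ _ _ hj]
      simp [hp]

-- sieve[q] = "q has no proper divisor ≥ 2", for 2 ≤ q ≤ n
theorem pv_sieve_getD (n q : Int) (h2 : 2 ≤ q) (hn : q ≤ n) :
    (pvSieve n).getD q.toNat false =
      !((PySem.List.pyRange 2 q 1).any (fun prime => PySem.Int.mod q prime == 0)) := by
  have hj : q.toNat < (List.replicate (n + 1).toNat true).length := by
    simp [List.length_replicate]; omega
  unfold pvSieve
  rw [pv_outer_fold_getD n _ _ _ hj]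
  have hrep : (List.replicate (n + 1).toNat true).getD q.toNat false = true := by
    rw [List.getD_eq_getElem?_getD, List.getElem?_replicate]
    have hq : q.toNat < (n + 1).toNat := by omega
    simp [hq]
  have hiff :
      ((PySem.List.pyRange 2 (n + 1) 1).any (fun p =>
        (PySem.List.pyRange (2 * p) (n + 1) p).any (fun m => m.toNat == q.toNat)) = true) ↔
      ((PySem.List.pyRange 2 q 1).any (fun prime => PySem.Int.mod q prime == 0) = true) := by
    simp only [List.any_eq_true, PySem.List.mem_pyRange_one, beq_iff_eq,
      PySem.Int.mod_eq_zero_iff_dvd]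
    constructor
    · rintro ⟨p, ⟨hp2, hpn⟩, m, hm, hmq⟩
      rw [PySem.List.mem_pyRange_iff_of_pos (by omega)] at hm
      obtain ⟨hm1, hm2, hdvd⟩ := hm
      have hmq' : m = q := by omega
      subst hmq'
      refine ⟨p, ⟨hp2, by omega⟩, ?_⟩
      have : p ∣ (m - 2 * p) + 2 * p := dvd_add hdvd (Dvd.intro 2 (by ring))
      simpa using this
    · rintro ⟨d, ⟨hd2, hdq⟩, hdvd⟩
      refine ⟨d, ⟨hd2, by omega⟩, q, ?_, by simp⟩
      rw [PySem.List.mem_pyRange_iff_of_pos (by omega)]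
      obtain ⟨k, hk⟩ := hdvd
      have hk2 : 2 ≤ k := by nlinarith
      refine ⟨by nlinarith, by omega, ?_⟩
      exact dvd_sub ⟨k, hk⟩ (Dvd.intro 2 (by ring))
  cases hA : (PySem.List.pyRange 2 q 1).any (fun prime => PySem.Int.mod q prime == 0) with
  | false =>
    have : ¬ ((PySem.List.pyRange 2 (n + 1) 1).any (fun p =>
        (PySem.List.pyRange (2 * p) (n + 1) p).any (fun m => m.toNat == q.toNat)) = true) := by
      rw [hiff, hA]; simp
    rw [if_neg this]
    simpa using hrep
  | true =>
    have : ((PySem.List.pyRange 2 (n + 1) 1).any (fun p =>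
        (PySem.List.pyRange (2 * p) (n + 1) p).any (fun m => m.toNat == q.toNat)) = true) := by
      rw [hiff, hA]
    rw [if_pos this]
    rfl

-- the paired digit-sum fold of A's happy_dig computes the two slice sums of B
theorem pv_pair_foldl (s : List Char) (a b : Int) (h : Nat) (hh : h ≤ s.length) :
    (List.range h).foldl
        (fun (acc : Int × Int) i =>
          (acc.1 + pvDigitA (s.getD i ' '), acc.2 + pvDigitA (s.reverse.getD i ' ')))
        (a, b) =
      (a + ((s.take h).map pvDigitA).sum, b + ((s.reverse.take h).map pvDigitA).sum) := by
  induction h with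
  | zero => simp
  | succ h ih =>
    rw [List.range_succ, List.foldl_append, ih (by omega)]
    have hs : h < s.length := by omega
    have hr : h < s.reverse.length := by simpa using hs
    simp only [List.foldl_cons, List.foldl_nil, List.take_add_one]
    rw [List.getD_eq_getElem s ' ' hs, List.getD_eq_getElem s.reverse ' ' hr]
    simp [hs, List.sum_append]
    constructor <;> ring

theorem pv_happy_eq (q : Int) : pvHappyDig q = pvHappyAlt q := by
  have hd : pvDigitA = pvDigitB := funext fun _ => rfl
  simp only [pvHappyDig, pvHappyAlt]
  rw [pv_pair_foldl _ 0 0 _ (Nat.div_le_self _ _)]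
  simp only [hd, zero_add, List.length_map, List.take_reverse, List.map_reverse,
    List.sum_reverse, ← List.map_take, ← List.map_drop]

-- ===== VERDICT (by name: the statement is the Claim_ definition above) =====
theorem prime_numbers_generator_spec : Claim_equal_prime_numbers_generator := by
  intro n n1 _
  unfold Spec_prime_numbers_generator prime_numbers_generator prime_numbers_generator_alt
  refine PySem.List.foldl_congr_mem' _ _ _ _ ?_
  intro q hq acc
  rw [PySem.List.mem_pyRange_one] at hq
  rw [pv_sieve_getD n q hq.1 (by omega), pv_happy_eq]
  cases hany : (PySem.List.pyRange 2 q 1).any (fun prime => PySem.Int.mod q prime == 0) <;>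
    simp [pvPalindrome, pvPalAlt]
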